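-- pv_equiv track=rewrite | github.com/mbasaran77/pyqt_app | plc_trial_siemens.py | make_key_arr
-- ===== SOURCE A (Python) =====
-- def make_key_arr(sorted_recete):
--     """
--     bu fonksiyon ikili dizileri alır ve plc için dizilein başlangıç ve sonu bulur
--     yalnız bu float dizi int yapıldıktan sonra mı olmalı ??
--     :param ikili_dizi:
--     :return:
--     """
--     key_arr = []
--     start = 0
--     for any_list in sorted_recete:
--         key_arr.append(start)
--         stop = start + len(any_list) - 1
--         key_arr.append(stop)
--         start = stop + 1
--     return key_arr
-- ===== SOURCE B (Python) =====
-- def make_key_arr(sorted_recete):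
--     offsets = [0]
--     for xs in sorted_recete:
--         offsets.append(offsets[-1] + len(xs))
--     return [v for i in range(len(sorted_recete)) for v in (offsets[i], offsets[i + 1] - 1)]
-- ===== Notes on version B (the rewrite author's own statement) =====
-- stated objective: alternative
-- what changed: Replaces the single running-offset loop that appends start/stop as it goes with a prefix-sum offsets table built first, then a separate indexed pass emitting (offsets[i], offsets[i+1]-1) pairs.
import Mathlib
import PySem

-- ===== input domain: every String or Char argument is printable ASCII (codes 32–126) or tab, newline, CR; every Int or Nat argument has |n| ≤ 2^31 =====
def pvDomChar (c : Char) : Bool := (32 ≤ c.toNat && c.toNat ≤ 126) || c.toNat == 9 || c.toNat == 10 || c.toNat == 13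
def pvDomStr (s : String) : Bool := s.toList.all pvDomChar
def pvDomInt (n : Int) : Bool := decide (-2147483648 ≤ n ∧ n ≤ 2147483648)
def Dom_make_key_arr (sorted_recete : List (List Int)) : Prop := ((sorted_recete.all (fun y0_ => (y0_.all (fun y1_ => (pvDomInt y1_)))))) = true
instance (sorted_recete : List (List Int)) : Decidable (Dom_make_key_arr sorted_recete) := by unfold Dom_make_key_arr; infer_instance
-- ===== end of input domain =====

-- B replaces A's running-offset scan with a prefix-sum offsets table plus a
-- separate indexed pass; alternative decomposition, same O(n) cost.


-- ===== PORT A =====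
-- loop state: (key_arr, start)
def make_key_arr (sorted_recete : List (List Int)) : List Int :=
  (sorted_recete.foldl
    (fun (st : List Int × Int) any_list =>
      let stop : Int := st.2 + (any_list.length : Int) - 1
      (st.1 ++ [st.2] ++ [stop], stop + 1))
    ([], 0)).1

-- ===== PORT B =====
-- offsets table: offsets[0] = 0, offsets.append(offsets[-1] + len(xs))
def mkaOffsets (sorted_recete : List (List Int)) : List Int :=
  sorted_recete.foldl
    (fun offsets xs => offsets ++ [(offsets.getLast?.getD 0) + (xs.length : Int)])
    [0]

def make_key_arr_alt (sorted_recete : List (List Int)) : List Int :=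
  let offsets := mkaOffsets sorted_recete
  (List.range sorted_recete.length).flatMap
    (fun i => [offsets.getD i 0, offsets.getD (i + 1) 0 - 1])

-- ===== PRECONDITION & SPEC =====
def Spec_make_key_arr (sorted_recete : List (List Int)) (out : List Int) : Prop := out = make_key_arr_alt sorted_recete
instance (sorted_recete : List (List Int)) (out : List Int) : Decidable (Spec_make_key_arr sorted_recete out) := by unfold Spec_make_key_arr; infer_instance

-- ===== CLAIM (what is proved, stated in full; the proofs are below) =====
def Claim_equal_make_key_arr : Prop := ∀ (sorted_recete : List (List Int)), Dom_make_key_arr sorted_recete → Spec_make_key_arr sorted_recete (make_key_arr sorted_recete)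

-- ===== LEMMAS AND PROOFS =====

-- common reference: the pair stream starting at offset s
def mkaPairs (s : Int) : List (List Int) → List Int
  | [] => []
  | xs :: t => s :: (s + (xs.length : Int) - 1) :: mkaPairs (s + (xs.length : Int)) t

theorem mka_foldA (l : List (List Int)) (acc : List Int) (s : Int) :
    (l.foldl
      (fun (st : List Int × Int) any_list =>
        let stop : Int := st.2 + (any_list.length : Int) - 1
        (st.1 ++ [st.2] ++ [stop], stop + 1))
      (acc, s)) = (acc ++ mkaPairs s l, s + (l.map (fun xs => (xs.length : Int))).sum) := by
  induction l generalizing acc s with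
  | nil => simp [mkaPairs]
  | cons xs t ih =>
    simp only [List.foldl_cons, mkaPairs, ih, List.map_cons, List.sum_cons]
    have h1 : s + (xs.length : Int) - 1 + 1 = s + (xs.length : Int) := by ring
    rw [h1, Prod.mk.injEq]
    exact ⟨by simp, by ring⟩

-- the trailing offsets after cumulative value c
def mkaTail (c : Int) : List (List Int) → List Int
  | [] => []
  | xs :: t => (c + (xs.length : Int)) :: mkaTail (c + (xs.length : Int)) t

theorem mka_offsets_shift (l : List (List Int)) (o : List Int) (c : Int)
    (h : o.getLast? = some c) :
    l.foldl (fun offsets xs => offsets ++ [(offsets.getLast?.getD 0) + (xs.length : Int)]) o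
      = o ++ mkaTail c l := by
  induction l generalizing o c with
  | nil => simp [mkaTail]
  | cons xs t ih =>
    simp only [List.foldl_cons]
    rw [ih (o ++ [(o.getLast?.getD 0) + (xs.length : Int)]) (c + (xs.length : Int))
      (by simp [h])]
    simp [mkaTail, h]

theorem mka_pass (l : List (List Int)) (s : Int) :
    (List.range l.length).flatMap
      (fun i => [(s :: mkaTail s l).getD i 0, (s :: mkaTail s l).getD (i + 1) 0 - 1])
      = mkaPairs s l := by
  induction l generalizing s with
  | nil => simp [mkaPairs]
  | cons xs t ih =>
    rw [List.length_cons, List.range_succ_eq_map, List.flatMap_cons, List.flatMap_map]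
    have hf : (fun (a : Nat) => [(s :: mkaTail s (xs :: t)).getD a.succ 0,
          (s :: mkaTail s (xs :: t)).getD (a.succ + 1) 0 - 1])
        = (fun i => [((s + (xs.length : Int)) :: mkaTail (s + (xs.length : Int)) t).getD i 0,
          ((s + (xs.length : Int)) :: mkaTail (s + (xs.length : Int)) t).getD (i + 1) 0 - 1]) := by
      funext i
      simp [mkaTail]
    rw [hf, ih (s + (xs.length : Int))]
    simp [mkaPairs, mkaTail]

-- ===== VERDICT (by name: the statement is the Claim_ definition above) =====
theorem make_key_arr_spec : Claim_equal_make_key_arr := by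
  intro l _
  show make_key_arr l = make_key_arr_alt l
  rw [make_key_arr, mka_foldA]
  show [] ++ mkaPairs 0 l = make_key_arr_alt l
  rw [List.nil_append, make_key_arr_alt]
  simp only [mkaOffsets, mka_offsets_shift l [0] 0 rfl, List.singleton_append]
  exact (mka_pass l 0).symm
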